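-- pv_equiv track=rewrite | github.com/Amenthyx/claw-agents-provisioner | shared/claw_skills.py | _extract_positional
-- ===== SOURCE A (Python) =====
-- from typing import Dict, List, Optional, Any
--
-- def _extract_positional(args: List[str], position: int) -> Optional[str]:
--     """Extract a positional argument, skipping known flags and their values.
--
--     The first arg (position 0) is always the action (e.g. --install).
--     Position 1 is the first non-flag argument after the action.
--     Known flags with values: --agent, --category, --platform.
--     """
--     FLAGS_WITH_VALUES = {"--agent", "--category", "--platform"}
--     pos_count = 0
--     skip_next = False
--     for i, arg in enumerate(args):
--         if skip_next:
--             skip_next = False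
--             continue
--         if arg in FLAGS_WITH_VALUES:
--             skip_next = True  # Skip this flag's value
--             continue
--         if pos_count == position:
--             return arg
--         pos_count += 1
--     return None
-- ===== SOURCE B (Python) =====
-- from typing import List, Optional
--
-- def _extract_positional(args: List[str], position: int) -> Optional[str]:
--     FLAGS_WITH_VALUES = {"--agent", "--category", "--platform"}
--     positionals = []
--     i = 0
--     n = len(args)
--     while i < n:
--         if args[i] in FLAGS_WITH_VALUES:
--             i += 2  # jump over the flag and its value
--         else:
--             positionals.append(args[i])
--             i += 1
--     if 0 <= position < len(positionals):
--         return positionals[position]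
--     return None
-- ===== Notes on version B (the rewrite author's own statement) =====
-- stated objective: simpler
-- what changed: Replaces the skip_next/pos_count state machine with count-and-early-return by an index-jumping scan (i += 2 over a flag and its value) that materializes the positional arguments, then a single guarded list index.
import Mathlib
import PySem

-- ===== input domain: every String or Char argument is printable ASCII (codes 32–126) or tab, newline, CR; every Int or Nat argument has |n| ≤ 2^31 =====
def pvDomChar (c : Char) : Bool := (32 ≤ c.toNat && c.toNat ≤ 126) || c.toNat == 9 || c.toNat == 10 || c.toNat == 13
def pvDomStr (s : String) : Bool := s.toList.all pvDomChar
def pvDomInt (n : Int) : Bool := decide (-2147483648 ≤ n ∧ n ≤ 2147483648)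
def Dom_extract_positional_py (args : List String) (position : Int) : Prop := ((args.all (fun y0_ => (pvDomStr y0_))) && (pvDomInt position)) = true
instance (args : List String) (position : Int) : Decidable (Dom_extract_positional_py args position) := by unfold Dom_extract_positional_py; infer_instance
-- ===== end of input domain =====

-- B replaces A's skip_next/pos_count state machine by an index-jumping scan that
-- materializes the positionals and then indexes once; objective: simpler.

def pvFlagsWithValues : List String := ["--agent", "--category", "--platform"]

-- ===== PORT A =====
-- the for-loop of A over the remaining args, with its pos_count and skip_next state
def pvALoop (args : List String) (position : Int) (pos_count : Int) (skip_next : Bool) : Option String :=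
  match args with
  | [] => none
  | arg :: rest =>
    if skip_next then pvALoop rest position pos_count false
    else if arg ∈ pvFlagsWithValues then pvALoop rest position pos_count true
    else if pos_count = position then some arg
    else pvALoop rest position (pos_count + 1) false

def extract_positional_py (args : List String) (position : Int) : Option String :=
  pvALoop args position 0 false

-- ===== PORT B =====
-- B's while loop: on a flag jump two places ahead, otherwise collect the arg
def pvCollect (args : List String) : List String :=
  match args with
  | [] => []
  | arg :: rest =>
    if arg ∈ pvFlagsWithValues then pvCollect (rest.drop 1)
    else arg :: pvCollect rest
termination_by args.length
decreasing_by all_goals (simp; try omega)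

def extract_positional_py_alt (args : List String) (position : Int) : Option String :=
  let positionals := pvCollect args
  if 0 ≤ position ∧ position < positionals.length then positionals[position.toNat]?
  else none

-- ===== PRECONDITION & SPEC =====
def Spec_extract_positional_py (args : List String) (position : Int) (out : Option String) : Prop := out = extract_positional_py_alt args position
instance (args : List String) (position : Int) (out : Option String) : Decidable (Spec_extract_positional_py args position out) := by unfold Spec_extract_positional_py; infer_instance

-- ===== CLAIM (what is proved, stated in full; the proofs are below) =====
def Claim_equal_extract_positional_py : Prop := ∀ (args : List String) (position : Int), Dom_extract_positional_py args position → Spec_extract_positional_py args position (extract_positional_py args position)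

-- ===== LEMMAS AND PROOFS =====

theorem pvALoop_eq_collect (args : List String) (position c : Int) :
    pvALoop args position c false =
      if c ≤ position then (pvCollect args)[(position - c).toNat]? else none := by
  induction args using pvCollect.induct generalizing c with
  | case1 =>
      simp [pvALoop, pvCollect]
  | case2 arg rest hflag ih =>
      -- flag head: A skips the next element, B drops it
      have hskip : pvALoop (arg :: rest) position c false = pvALoop (rest.drop 1) position c false := by
        cases rest with
        | nil => simp [pvALoop, hflag]
        | cons b rest' => simp [pvALoop, hflag]
      rw [hskip, ih, pvCollect]
      simp [hflag]
  | case3 arg rest hflag ih =>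
      rw [pvALoop]
      simp only [hflag, if_false, Bool.false_eq_true]
      by_cases hc : c = position
      · subst hc
        simp [pvCollect, hflag]
      · rw [if_neg hc, ih, pvCollect, if_neg hflag]
        by_cases hle : c + 1 ≤ position
        · have h1 : c ≤ position := by omega
          have h2 : (position - c).toNat = (position - (c + 1)).toNat + 1 := by omega
          simp [hle, h1, h2]
        · have h1 : ¬ c ≤ position := by omega
          simp [hle, h1]

theorem extract_positional_py_spec : Claim_equal_extract_positional_py := by
  intro args position _
  show extract_positional_py args position = extract_positional_py_alt args position
  rw [extract_positional_py, pvALoop_eq_collect]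
  unfold extract_positional_py_alt
  by_cases h0 : 0 ≤ position
  · by_cases hlt : position < (pvCollect args).length
    · simp [h0, hlt]
    · have : (pvCollect args)[(position - 0).toNat]? = none := by
        apply List.getElem?_eq_none
        omega
      simp [h0, hlt]
  · simp [h0]
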